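-- pv_equiv track=rewrite | github.com/qvizt/HackerRank-Solutions-Java | Python/Algorithms/Implementation/Breaking the Records.py | get_min_max_records_change
-- ===== SOURCE A (Python) =====
-- def get_min_max_records_change(scores):
--     """Computes how often a score changes the record for min and max points. The
--     result is returned as tuple in the form (min points changes, max points changes)."""
--     min_changes = 0
--     max_changes = 0
--     min_score = scores[0]
--     max_score = scores[0]
--
--     for i in range(1, len(scores)):
--         score = scores[i]
--
--         if score < min_score:
--             min_changes += 1
--             min_score = score
--         elif score > max_score:
--             max_changes += 1
--             max_score = score
--
--     return min_changes, max_changes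
-- ===== SOURCE B (Python) =====
-- def get_min_max_records_change(scores):
--     """Computes how often a score changes the record for min and max points. The
--     result is returned as tuple in the form (min points changes, max points changes)."""
--     mins = scores[:1]
--     maxs = scores[:1]
--     for s in scores[1:]:
--         mins.append(mins[-1] if mins[-1] <= s else s)
--         maxs.append(maxs[-1] if maxs[-1] >= s else s)
--     min_changes = sum(a > b for a, b in zip(mins, mins[1:]))
--     max_changes = sum(a < b for a, b in zip(maxs, maxs[1:]))
--     return min_changes, max_changes
-- ===== Notes on version B (the rewrite author's own statement) =====
-- stated objective: alternative
-- what changed: B builds the running-minimum and running-maximum prefix sequences and then counts adjacent strict decreases/increases in them, instead of A's single index loop updating record counters in place.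
import Mathlib
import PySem

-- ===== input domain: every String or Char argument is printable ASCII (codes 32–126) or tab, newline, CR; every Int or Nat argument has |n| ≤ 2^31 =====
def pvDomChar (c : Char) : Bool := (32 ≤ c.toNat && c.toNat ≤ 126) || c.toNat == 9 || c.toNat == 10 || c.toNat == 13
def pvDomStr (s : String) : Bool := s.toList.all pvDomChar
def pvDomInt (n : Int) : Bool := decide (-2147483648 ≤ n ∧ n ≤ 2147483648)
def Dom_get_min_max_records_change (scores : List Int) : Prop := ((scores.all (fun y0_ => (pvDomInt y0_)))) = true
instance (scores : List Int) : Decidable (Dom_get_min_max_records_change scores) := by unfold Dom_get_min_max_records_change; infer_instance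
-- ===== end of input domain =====

-- B builds prefix min/max sequences and counts their strict changes; equivalence is about the return value only.
-- ===== PORT A =====
def get_min_max_records_change (scores : List Int) : Int × Int :=
  match PySem.List.pyGet? scores 0 with
  | none => (0, 0)  -- Python raises IndexError here; excluded by Pre_
  | some s0 =>
    let st := (PySem.List.pyRange 1 (scores.length : Int) 1).foldl
      (fun (st : Int × Int × Int × Int) i =>
        if PySem.List.pyGetD scores i 0 < st.2.2.1 then (st.1 + 1, st.2.1, PySem.List.pyGetD scores i 0, st.2.2.2)
        else if PySem.List.pyGetD scores i 0 > st.2.2.2 then (st.1, st.2.1 + 1, st.2.2.1, PySem.List.pyGetD scores i 0)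
        else st)
      (0, 0, s0, s0)
    (st.1, st.2.1)

-- ===== PORT B =====
def get_min_max_records_change_alt (scores : List Int) : Int × Int :=
  let p := (PySem.List.slice scores (some 1) none).foldl
    (fun (p : List Int × List Int) s =>
      let ml := (PySem.List.pyGet? p.1 (-1)).getD 0
      let xl := (PySem.List.pyGet? p.2 (-1)).getD 0
      (p.1 ++ [if ml ≤ s then ml else s], p.2 ++ [if xl ≥ s then xl else s]))
    (PySem.List.slice scores none (some 1), PySem.List.slice scores none (some 1))
  let minChanges : Int := ((p.1.zip p.1.tail).countP (fun q => q.1 > q.2) : Nat)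
  let maxChanges : Int := ((p.2.zip p.2.tail).countP (fun q => q.1 < q.2) : Nat)
  (minChanges, maxChanges)

-- ===== PRECONDITION & SPEC =====
-- Pre_ excludes exactly the empty list, on which Python A raises IndexError (scores[0]).
def Pre_get_min_max_records_change (scores : List Int) : Prop := scores ≠ []
instance (scores : List Int) : Decidable (Pre_get_min_max_records_change scores) := by unfold Pre_get_min_max_records_change; infer_instance
def pvWitness_get_min_max_records_change : List Int := [3, 1, 4, 1, 5]

def Spec_get_min_max_records_change (scores : List Int) (out : Int × Int) : Prop := out = get_min_max_records_change_alt scores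
instance (scores : List Int) (out : Int × Int) : Decidable (Spec_get_min_max_records_change scores out) := by unfold Spec_get_min_max_records_change; infer_instance

-- ===== CLAIM (what is proved, stated in full; the proofs are below) =====
def Claim_equal_get_min_max_records_change : Prop := ∀ (scores : List Int), Dom_get_min_max_records_change scores → Pre_get_min_max_records_change scores → Spec_get_min_max_records_change scores (get_min_max_records_change scores)

-- ===== LEMMAS AND PROOFS =====

-- prefix-extrema sequence: pvScan f a l = [a, f a l0, f (f a l0) l1, …]
def pvScan (f : Int → Int → Int) (a : Int) : List Int → List Int
  | [] => [a]
  | x :: xs => a :: pvScan f (f a x) xs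

def pvFmin (a x : Int) : Int := if a ≤ x then a else x
def pvFmax (a x : Int) : Int := if a ≥ x then a else x

def pvCnt (p : Int × Int → Bool) (xs : List Int) : Nat := (xs.zip xs.tail).countP p

-- last element of a snoc via Python's xs[-1]
theorem pvGetLast (xs : List Int) (a : Int) :
    (PySem.List.pyGet? (xs ++ [a]) (-1)).getD 0 = a := by
  simp [PySem.List.pyGet?, PySem.List.pyIdx?]

theorem pvCnt_scan_cons (p : Int × Int → Bool) (f : Int → Int → Int) (a x : Int) (l : List Int) :
    pvCnt p (pvScan f a (x :: l)) = (if p (a, f a x) then 1 else 0) + pvCnt p (pvScan f (f a x) l) := by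
  cases l <;> simp [pvScan, pvCnt, List.countP_cons] <;> split <;> omega

-- B's loop builds the two prefix-extrema sequences
theorem pvLoopB (l : List Int) : ∀ (P Q : List Int) (a b : Int),
    l.foldl
      (fun (p : List Int × List Int) s =>
        let ml := (PySem.List.pyGet? p.1 (-1)).getD 0
        let xl := (PySem.List.pyGet? p.2 (-1)).getD 0
        (p.1 ++ [if ml ≤ s then ml else s], p.2 ++ [if xl ≥ s then xl else s]))
      (P ++ [a], Q ++ [b])
    = (P ++ pvScan pvFmin a l, Q ++ pvScan pvFmax b l) := by
  induction l with
  | nil => intro P Q a b; simp [pvScan]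
  | cons x xs ih =>
    intro P Q a b
    simp only [List.foldl_cons, pvGetLast]
    have := ih (P ++ [a]) (Q ++ [b]) (pvFmin a x) (pvFmax b x)
    simp only [List.append_assoc] at this ⊢
    simpa [pvFmin, pvFmax] using this

-- A's loop counts exactly the strict changes of the prefix-extrema sequences
theorem pvLoopA (l : List Int) : ∀ (mc Mc a b : Int), a ≤ b →
    l.foldl
      (fun (st : Int × Int × Int × Int) score =>
        if score < st.2.2.1 then (st.1 + 1, st.2.1, score, st.2.2.2)
        else if score > st.2.2.2 then (st.1, st.2.1 + 1, st.2.2.1, score)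
        else st)
      (mc, Mc, a, b)
    = (mc + (pvCnt (fun q => q.1 > q.2) (pvScan pvFmin a l) : Nat),
       Mc + (pvCnt (fun q => q.1 < q.2) (pvScan pvFmax b l) : Nat),
       (l.foldl (fun st s => (pvFmin st.1 s, pvFmax st.2 s)) (a, b) : Int × Int).1,
       (l.foldl (fun st s => (pvFmin st.1 s, pvFmax st.2 s)) (a, b)).2) := by
  induction l with
  | nil => intro mc Mc a b _; simp [pvScan, pvCnt]
  | cons x xs ih =>
    intro mc Mc a b hab
    simp only [List.foldl_cons, pvCnt_scan_cons]
    by_cases h1 : x < a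
    · have hmin : pvFmin a x = x := by simp [pvFmin]; omega
      have hmax : pvFmax b x = b := by simp [pvFmax]; omega
      rw [if_pos h1, hmin, hmax, ih (mc + 1) Mc x b (by omega)]
      simp [h1, Prod.ext_iff]
      omega
    · have hmin : pvFmin a x = a := by simp [pvFmin]; omega
      by_cases h2 : x > b
      · have hmax : pvFmax b x = x := by simp [pvFmax]; omega
        rw [if_neg h1, if_pos h2, hmin, hmax, ih mc (Mc + 1) a x (by omega)]
        simp [h2, Prod.ext_iff]
        omega
      · have hmax : pvFmax b x = b := by simp [pvFmax]; omega
        rw [if_neg h1, if_neg h2, hmin, hmax, ih mc Mc a b hab]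
        simp

-- ===== VERDICT (by name: the statement is the Claim_ definition above) =====
theorem get_min_max_records_change_spec : Claim_equal_get_min_max_records_change := by
  intro scores _ hpre
  unfold Spec_get_min_max_records_change
  match scores, hpre with
  | s0 :: rest, _ =>
    unfold get_min_max_records_change get_min_max_records_change_alt
    have hA0 : PySem.List.pyGet? (s0 :: rest) 0 = some s0 := by
      simp [PySem.List.pyGet?, PySem.List.pyIdx?]
    have hs1 : PySem.List.slice (s0 :: rest) (some 1) none = rest := by
      simp [PySem.List.slice_from]
    have hs0 : PySem.List.slice (s0 :: rest) none (some 1) = [s0] := by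
      simp [PySem.List.slice_to]
    rw [hA0]
    have hfold := PySem.List.foldl_pyRange_pyGetD' (xs := s0 :: rest) (a := 1) (d := 0)
      (f := fun (st : Int × Int × Int × Int) score =>
        if score < st.2.2.1 then (st.1 + 1, st.2.1, score, st.2.2.2)
        else if score > st.2.2.2 then (st.1, st.2.1 + 1, st.2.2.1, score)
        else st)
      (init := (0, 0, s0, s0)) (by omega)
    simp only [hs1, hs0]
    simp only [hfold]
    have hB := pvLoopB rest [] [] s0 s0
    simp only [List.nil_append] at hB
    simp only [hB]
    have hA := pvLoopA rest 0 0 s0 s0 le_rfl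
    have hd : List.drop (Int.toNat 1) (s0 :: rest) = rest := rfl
    rw [hd, hA]
    simp [pvCnt]
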